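-- pv_equiv track=rewrite | github.com/Jeganeswaran/probability_combinations_coins | probability_combinations_coins.py | is_attend_graduation
-- ===== SOURCE A (Python) =====
-- def is_attend_graduation(attendance, condition_limit):
--     """
--      here will calculate student's consecutive missed class based on the probability of combinations.
--      That calculation count and condition limit will based to allow or not will decided
--
--      @param attendance: probability of attended class sequence
--      @param condition_limit: condition days limit of allowing the graduation ceremony
--
--      @return : boolean value based calculate student's consecutive missed class and days limit
--     """
--     consecutive_absent_count = 0
--     for i in attendance:
--         if i == "A":
--             consecutive_absent_count += 1
--             if consecutive_absent_count >= condition_limit: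
--                 return False
--         else:
--             consecutive_absent_count = 0
--     return True
-- ===== SOURCE B (Python) =====
-- from itertools import groupby
--
-- def is_attend_graduation(attendance, condition_limit):
--     return not any(key == "A" and sum(1 for _ in group) >= condition_limit
--                    for key, group in groupby(attendance))
-- ===== Notes on version B (the rewrite author's own statement) =====
-- stated objective: idiomatic
-- what changed: Replaces the inline reset counter with itertools.groupby: the sequence is partitioned into maximal runs of equal elements and the run length of each 'A'-group is tested against the limit.
import Mathlib
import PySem

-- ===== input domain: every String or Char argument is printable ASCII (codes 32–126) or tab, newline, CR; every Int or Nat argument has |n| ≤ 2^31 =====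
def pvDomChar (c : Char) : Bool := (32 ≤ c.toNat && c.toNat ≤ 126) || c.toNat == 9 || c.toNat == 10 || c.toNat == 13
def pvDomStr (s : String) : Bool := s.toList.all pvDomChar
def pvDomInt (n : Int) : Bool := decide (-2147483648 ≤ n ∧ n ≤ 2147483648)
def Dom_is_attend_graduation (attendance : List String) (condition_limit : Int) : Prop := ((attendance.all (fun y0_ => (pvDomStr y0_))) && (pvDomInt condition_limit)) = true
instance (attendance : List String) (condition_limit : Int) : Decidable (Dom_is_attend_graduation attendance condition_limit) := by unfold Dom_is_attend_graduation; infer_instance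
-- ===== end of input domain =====

-- B replaces A's inline reset counter with a groupby-style pass: partition into
-- maximal runs of equal elements and test each 'A'-run's length against the limit.

-- ===== PORT A =====
-- A's loop: counter of consecutive "A", reset on anything else, early False on reaching the limit.
def pvLoopA (condition_limit : Int) : List String → Int → Bool
  | [], _ => true
  | i :: rest, c =>
    if i == "A" then
      if c + 1 ≥ condition_limit then false else pvLoopA condition_limit rest (c + 1)
    else pvLoopA condition_limit rest 0

def is_attend_graduation (attendance : List String) (condition_limit : Int) : Bool :=
  pvLoopA condition_limit attendance 0

-- ===== PORT B =====
-- itertools.groupby: successive (key, run-length) groups of equal elements.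
def pvGroups : List String → List (String × Int)
  | [] => []
  | x :: xs =>
    (x, ((xs.takeWhile (fun y => y == x)).length : Int) + 1)
      :: pvGroups (xs.dropWhile (fun y => y == x))
termination_by l => l.length
decreasing_by
  simp only [List.length_cons]
  exact Nat.lt_succ_of_le (List.length_dropWhile_le _ _)


def is_attend_graduation_alt (attendance : List String) (condition_limit : Int) : Bool :=
  !((pvGroups attendance).any (fun kg => kg.1 == "A" && decide (kg.2 ≥ condition_limit)))

-- ===== PRECONDITION & SPEC =====
def Spec_is_attend_graduation (attendance : List String) (condition_limit : Int) (out : Bool) : Prop := out = is_attend_graduation_alt attendance condition_limit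
instance (attendance : List String) (condition_limit : Int) (out : Bool) : Decidable (Spec_is_attend_graduation attendance condition_limit out) := by unfold Spec_is_attend_graduation; infer_instance

-- ===== CLAIM (what is proved, stated in full; the proofs are below) =====
def Claim_equal_is_attend_graduation : Prop := ∀ (attendance : List String) (condition_limit : Int), Dom_is_attend_graduation attendance condition_limit → Spec_is_attend_graduation attendance condition_limit (is_attend_graduation attendance condition_limit)

-- ===== LEMMAS AND PROOFS =====

theorem pvGroups_nil : pvGroups [] = [] := by rw [pvGroups.eq_def]

theorem pvGroups_cons (x : String) (xs : List String) :
    pvGroups (x :: xs) =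
      (x, ((xs.takeWhile (fun y => y == x)).length : Int) + 1)
        :: pvGroups (xs.dropWhile (fun y => y == x)) := by
  rw [pvGroups.eq_def]

-- A's loop over a run of k "A"s: False iff the counter would reach the limit inside the run.
theorem pvLoopA_replicate (lim : Int) (k : Nat) (rest : List String) :
    ∀ c : Int, pvLoopA lim (List.replicate k "A" ++ rest) c =
      if 1 ≤ k ∧ c + k ≥ lim then false else pvLoopA lim rest (c + k) := by
  induction k with
  | zero =>
    intro c
    simp [List.replicate]
  | succ k ih =>
    intro c
    rw [List.replicate_succ, List.cons_append, pvLoopA]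
    simp only [beq_self_eq_true, if_true]
    by_cases h1 : c + 1 ≥ lim
    · rw [if_pos h1, if_pos ⟨Nat.le_add_left 1 k, by push_cast; omega⟩]
    · rw [if_neg h1, ih]
      by_cases h2 : 1 ≤ k ∧ c + 1 + (k : Int) ≥ lim
      · rw [if_pos h2, if_pos ⟨Nat.le_add_left 1 k, by push_cast; omega⟩]
      · have hk : ¬ (c + ((k : Int) + 1) ≥ lim) := by
          push_cast at h2 ⊢; omega
        rw [if_neg h2, if_neg (by push_cast at hk ⊢; omega)]
        congr 1
        push_cast
        ring

-- A nonempty prefix containing no "A" only resets the counter.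
theorem pvLoopA_noA (lim : Int) (p : List String) (hp : ∀ y ∈ p, y ≠ "A") (rest : List String) :
    ∀ c : Int, p ≠ [] → pvLoopA lim (p ++ rest) c = pvLoopA lim rest 0 := by
  induction p with
  | nil => intro c h; exact absurd rfl h
  | cons y p ih =>
    intro c _
    rw [List.cons_append, pvLoopA]
    rw [if_neg (by simpa using hp y (List.mem_cons_self))]
    cases p with
    | nil => simp
    | cons z q => exact ih (fun a ha => hp a (List.mem_cons_of_mem _ ha)) 0 (by simp)

-- Starting the loop on a list whose head is not "A" (or the empty list) ignores the counter.
theorem pvLoopA_head (lim : Int) (l : List String)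
    (h : ∀ y t, l = y :: t → y ≠ "A") (c : Int) :
    pvLoopA lim l c = pvLoopA lim l 0 := by
  cases l with
  | nil => rfl
  | cons y t =>
    rw [pvLoopA, pvLoopA, if_neg (by simpa using h y t rfl), if_neg (by simpa using h y t rfl)]

theorem pv_takeWhile_replicate (x : String) (xs : List String) :
    xs.takeWhile (fun y => y == x) = List.replicate (xs.takeWhile (fun y => y == x)).length x := by
  apply List.eq_replicate_of_mem
  intro y hy
  have := List.mem_takeWhile_imp hy
  simpa using this

theorem pv_dropWhile_head (x : String) (xs : List String) :
    ∀ y t, xs.dropWhile (fun z => z == x) = y :: t → y ≠ x := by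
  intro y t h hyx
  have := List.head?_dropWhile_not (fun z => z == x) xs
  rw [h] at this
  simp [hyx] at this

theorem pv_main (lim : Int) : ∀ (n : Nat) (l : List String), l.length ≤ n →
    pvLoopA lim l 0 = !((pvGroups l).any (fun kg => kg.1 == "A" && decide (kg.2 ≥ lim))) := by
  intro n
  induction n with
  | zero =>
    intro l hl
    rw [List.length_eq_zero_iff.mp (Nat.le_zero.mp hl)]
    simp [pvGroups_nil, pvLoopA]
  | succ n ih =>
    intro l hl
    cases l with
    | nil => simp [pvGroups_nil, pvLoopA]
    | cons x xs =>
      set k := (xs.takeWhile (fun y => y == x)).length with hk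
      have hsplit : xs = xs.takeWhile (fun y => y == x) ++ xs.dropWhile (fun y => y == x) :=
        (List.takeWhile_append_dropWhile).symm
      have hrest_len : (xs.dropWhile (fun y => y == x)).length ≤ n := by
        have := List.length_dropWhile_le (fun y => y == x) xs
        simp only [List.length_cons] at hl
        omega
      rw [pvGroups_cons]
      by_cases hx : x = "A"
      · subst hx
        have hfull : ("A" :: xs) = List.replicate (k + 1) "A" ++ xs.dropWhile (fun y => y == "A") := by
          rw [List.replicate_succ, List.cons_append]
          congr 1
          conv_lhs => rw [hsplit]
          congr 1
          exact pv_takeWhile_replicate "A" xs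
        rw [hfull, pvLoopA_replicate]
        rw [List.any_cons]
        simp only [beq_self_eq_true, Bool.true_and]
        by_cases hge : ((k : Int) + 1) ≥ lim
        · rw [if_pos ⟨by omega, by push_cast; omega⟩, ← hk]
          simp [decide_eq_true hge]
        · rw [if_neg (by push_cast at hge ⊢; omega)]
          rw [pvLoopA_head lim _ (fun y t h hy => pv_dropWhile_head "A" xs y t h (by simpa using hy))]
          rw [ih _ hrest_len, ← hk]
          simp [decide_eq_false hge]
      · rw [pvLoopA, if_neg (by simpa using hx)]
        by_cases hp : xs.takeWhile (fun y => y == x) = []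
        · rw [List.any_cons]
          simp only [show (x == "A") = false from by simpa using hx, Bool.false_and, Bool.false_or]
          conv_lhs => rw [hsplit, hp, List.nil_append]
          exact ih _ hrest_len
        · conv_lhs => rw [hsplit]
          rw [pvLoopA_noA lim _ (fun y hy => by
            have := List.mem_takeWhile_imp hy
            simp only [beq_iff_eq] at this
            rw [this]; exact hx) _ 0 hp]
          rw [List.any_cons]
          simp only [show (x == "A") = false from by simpa using hx, Bool.false_and, Bool.false_or]
          exact ih _ hrest_len

-- ===== VERDICT (by name: the statement is the Claim_ definition above) =====
theorem is_attend_graduation_spec : Claim_equal_is_attend_graduation := by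
  intro attendance condition_limit _
  unfold Spec_is_attend_graduation is_attend_graduation is_attend_graduation_alt
  exact pv_main condition_limit attendance.length attendance le_rfl
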